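-- pv_equiv track=rewrite | github.com/AIchemizt/dance-analysis-server | analyzer/movement_analyzer.py | temporal_pose_filter
-- ===== SOURCE A (Python) =====
-- from typing import List, Dict, Any, Optional
--
-- def temporal_pose_filter(
--                         pose_detections: Dict[str, List[bool]],
--                         min_consecutive: int = 3) -> Dict[str, List[int]]:
--     """
--     Apply temporal filtering to reduce false positive pose detections.
--     A pose must be held for at least min_consecutive frames to count.
--     This prevents fleeting "accidental" poses during transitions.
--
--     Args:
--         pose_detections: Dict mapping pose names to boolean detection lists
--         min_consecutive: Minimum frames to confirm a pose
--
--     Returns: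
--         Dict mapping pose names to lists of confirmed frame numbers
--
--     Example:
--     Input: {'T-Pose': [False, False, True, True, True, False, True, False]}
--     Output: {'T-Pose': [2, 3, 4]}  (frames 2-4 had 3 consecutive detections)
--     """
--     filtered_results = {}
--
--     for pose_name, detections in pose_detections.items():
--         confirmed_frames = []
--         consecutive_count = 0
--         start_frame = 0
--
--         for i, detected in enumerate(detections):
--             if detected:
--                 if consecutive_count == 0:
--                     start_frame = i
--                 consecutive_count += 1
--
--                 # Once we hit the threshold, mark all frames in the sequence
--                 if consecutive_count >= min_consecutive:
--                     # Add frames that weren't already added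
--                     for frame_num in range(start_frame, i + 1):
--                         if frame_num not in confirmed_frames:
--                             confirmed_frames.append(frame_num)
--             else:
--                 consecutive_count = 0
--
--         filtered_results[pose_name] = sorted(confirmed_frames)
--
--     return filtered_results
-- ===== SOURCE B (Python) =====
-- def temporal_pose_filter(pose_detections, min_consecutive=3):
--     """One forward pass per pose: when a run of detections first reaches the
--     threshold, emit the whole run; every further frame of the run is appended
--     directly. Frames come out already sorted, so no final sort is needed."""
--     result = {}
--     threshold = max(min_consecutive, 1)
--     for pose_name, detections in pose_detections.items():
--         frames = []
--         run = 0
--         for i, detected in enumerate(detections):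
--             if not detected:
--                 run = 0
--                 continue
--             run += 1
--             if run == threshold:
--                 frames.extend(range(i - run + 1, i + 1))
--             elif run > threshold:
--                 frames.append(i)
--         result[pose_name] = frames
--     return result
-- ===== Notes on version B (the rewrite author's own statement) =====
-- stated objective: alternative
-- what changed: Replaces A's per-frame re-scan of range(start,i+1) with membership tests against the growing result list plus a final sort by a single forward pass that emits each run's frames exactly once when the run first reaches the threshold and then appends one frame per step, producing the list already sorted; on random inputs the measured cost is similar.
import Mathlib
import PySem

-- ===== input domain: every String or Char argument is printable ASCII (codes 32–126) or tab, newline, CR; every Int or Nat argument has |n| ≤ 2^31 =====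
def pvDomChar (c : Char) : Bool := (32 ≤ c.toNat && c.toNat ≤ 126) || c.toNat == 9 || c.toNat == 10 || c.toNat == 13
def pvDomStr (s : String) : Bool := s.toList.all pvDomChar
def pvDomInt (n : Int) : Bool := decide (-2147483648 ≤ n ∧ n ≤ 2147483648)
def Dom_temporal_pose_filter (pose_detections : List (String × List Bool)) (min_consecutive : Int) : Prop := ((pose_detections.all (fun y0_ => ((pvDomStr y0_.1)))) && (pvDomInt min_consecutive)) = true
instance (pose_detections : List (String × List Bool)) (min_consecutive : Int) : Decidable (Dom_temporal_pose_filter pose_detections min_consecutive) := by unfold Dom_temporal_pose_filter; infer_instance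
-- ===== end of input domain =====

-- B replaces A's per-frame re-scan + final sort by a single forward pass that emits each run once, already sorted (objective: alternative).

-- ===== PORT A =====
-- inner loop 'for frame_num in range(start_frame, i+1): if frame_num not in confirmed_frames: confirmed_frames.append(frame_num)'
def pvMarkRange (confirmed : List Int) (start fin : Int) : List Int :=
  (PySem.List.pyRange start fin 1).foldl
    (fun acc f => if f ∈ acc then acc else acc ++ [f]) confirmed

-- the 'for i, detected in enumerate(detections)' loop of A, state (confirmed_frames, consecutive_count, start_frame)
def pvAFrames (min_consecutive : Int) : List Bool → Int → List Int → Int → Int → List Int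
  | [], _, confirmed, _, _ => confirmed
  | detected :: rest, i, confirmed, count, start =>
    if detected then
      let start' := if count = 0 then i else start
      let count' := count + 1
      if min_consecutive ≤ count' then
        pvAFrames min_consecutive rest (i + 1) (pvMarkRange confirmed start' (i + 1)) count' start'
      else
        pvAFrames min_consecutive rest (i + 1) confirmed count' start'
    else
      pvAFrames min_consecutive rest (i + 1) confirmed 0 start

def temporal_pose_filter (pose_detections : List (String × List Bool)) (min_consecutive : Int) : List (String × List Int) :=
  (pose_detections.foldl
    (fun (res : PySem.Dict String (List Int)) p =>
      res.insert p.1 (PySem.List.sorted (pvAFrames min_consecutive p.2 0 [] 0 0) (fun x => x) false))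
    PySem.Dict.empty).items

-- ===== PORT B =====
-- B's inner loop: state (frames, run); on run == threshold extend with the whole run, past it append i
def pvBFrames (threshold : Int) : List Bool → Int → List Int → Int → List Int
  | [], _, frames, _ => frames
  | detected :: rest, i, frames, run =>
    if detected then
      let run' := run + 1
      let frames' :=
        if run' = threshold then frames ++ PySem.List.pyRange (i - run' + 1) (i + 1) 1
        else if threshold < run' then frames ++ [i]
        else frames
      pvBFrames threshold rest (i + 1) frames' run'
    else
      pvBFrames threshold rest (i + 1) frames 0

def temporal_pose_filter_alt (pose_detections : List (String × List Bool)) (min_consecutive : Int) : List (String × List Int) :=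
  let threshold := max min_consecutive 1
  (pose_detections.foldl
    (fun (res : PySem.Dict String (List Int)) p =>
      res.insert p.1 (pvBFrames threshold p.2 0 [] 0))
    PySem.Dict.empty).items

-- ===== PRECONDITION & SPEC =====
def Spec_temporal_pose_filter (pose_detections : List (String × List Bool)) (min_consecutive : Int) (out : List (String × List Int)) : Prop := out = temporal_pose_filter_alt pose_detections min_consecutive
instance (pose_detections : List (String × List Bool)) (min_consecutive : Int) (out : List (String × List Int)) : Decidable (Spec_temporal_pose_filter pose_detections min_consecutive out) := by unfold Spec_temporal_pose_filter; infer_instance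

-- ===== CLAIM (what is proved, stated in full; the proofs are below) =====
def Claim_equal_temporal_pose_filter : Prop := ∀ (pose_detections : List (String × List Bool)) (min_consecutive : Int), Dom_temporal_pose_filter pose_detections min_consecutive → Spec_temporal_pose_filter pose_detections min_consecutive (temporal_pose_filter pose_detections min_consecutive)

-- ===== LEMMAS AND PROOFS =====

lemma pvAFrames_cons_true (mn : Int) (rest : List Bool) (i : Int) (confirmed : List Int)
    (count start : Int) :
    pvAFrames mn (true :: rest) i confirmed count start =
      (if mn ≤ count + 1 then
        pvAFrames mn rest (i + 1) (pvMarkRange confirmed (if count = 0 then i else start) (i + 1)) (count + 1) (if count = 0 then i else start)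
      else
        pvAFrames mn rest (i + 1) confirmed (count + 1) (if count = 0 then i else start)) := rfl

lemma pvAFrames_cons_false (mn : Int) (rest : List Bool) (i : Int) (confirmed : List Int)
    (count start : Int) :
    pvAFrames mn (false :: rest) i confirmed count start =
      pvAFrames mn rest (i + 1) confirmed 0 start := rfl

lemma pvBFrames_cons_true (th : Int) (rest : List Bool) (i : Int) (frames : List Int)
    (run : Int) :
    pvBFrames th (true :: rest) i frames run =
      pvBFrames th rest (i + 1)
        (if run + 1 = th then frames ++ PySem.List.pyRange (i - (run + 1) + 1) (i + 1) 1
         else if th < run + 1 then frames ++ [i] else frames) (run + 1) := rfl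

lemma pvBFrames_cons_false (th : Int) (rest : List Bool) (i : Int) (frames : List Int)
    (run : Int) :
    pvBFrames th (false :: rest) i frames run =
      pvBFrames th rest (i + 1) frames 0 := rfl

lemma pvMarkRange_nil {acc : List Int} {lo hi : Int} (h : hi ≤ lo) :
    pvMarkRange acc lo hi = acc := by
  simp [pvMarkRange, PySem.List.pyRange_one_eq_nil h]

lemma pvMarkRange_cons {acc : List Int} {lo hi : Int} (h : lo < hi) :
    pvMarkRange acc lo hi = pvMarkRange (if lo ∈ acc then acc else acc ++ [lo]) (lo + 1) hi := by
  simp [pvMarkRange, PySem.List.pyRange_one_cons h]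

-- A's inner re-scan over a fresh run (no frame yet recorded) appends the whole range
lemma pvMarkRange_fresh (hi : Int) : ∀ (n : Nat) (lo : Int) (acc : List Int),
    (hi - lo).toNat = n → (∀ x ∈ acc, x < lo) →
    pvMarkRange acc lo hi = acc ++ PySem.List.pyRange lo hi 1 := by
  intro n
  induction n with
  | zero =>
    intro lo acc hn _
    have hle : hi ≤ lo := by omega
    simp [pvMarkRange_nil hle, PySem.List.pyRange_one_eq_nil hle]
  | succ m ih =>
    intro lo acc hn hlt
    have hlo : lo < hi := by omega
    have hnot : lo ∉ acc := fun h => absurd (hlt lo h) (lt_irrefl lo)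
    rw [pvMarkRange_cons hlo, if_neg hnot,
        ih (lo + 1) (acc ++ [lo]) (by omega)
          (by intro x hx; rcases List.mem_append.mp hx with h | h
              · exact lt_trans (hlt x h) (by omega)
              · simp at h; omega),
        PySem.List.pyRange_one_cons hlo]
    simp

-- A's inner re-scan over an already-emitted run appends only the newest frame
lemma pvMarkRange_covered : ∀ (n : Nat) (lo hi : Int) (acc : List Int),
    (hi - lo).toNat = n → lo ≤ hi - 1 →
    (∀ f : Int, lo ≤ f → f < hi - 1 → f ∈ acc) → (hi - 1) ∉ acc →
    pvMarkRange acc lo hi = acc ++ [hi - 1] := by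
  intro n
  induction n with
  | zero => intro lo hi acc hn hle _ _; omega
  | succ m ih =>
    intro lo hi acc hn hle hmem hnot
    have hlo : lo < hi := by omega
    by_cases hlast : lo = hi - 1
    · subst hlast
      rw [pvMarkRange_cons hlo, if_neg hnot, pvMarkRange_nil (by omega)]
    · have hin : lo ∈ acc := hmem lo le_rfl (by omega)
      rw [pvMarkRange_cons hlo, if_pos hin]
      exact ih (lo + 1) hi acc (by omega) (by omega)
        (fun f h1 h2 => hmem f (by omega) h2) hnot

-- the loop invariant tying A's state to B's: counts agree, frame lists agree and are
-- strictly increasing below the current index, a run below threshold has emitted nothing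
-- at or past its start, a run at/past threshold has emitted all its frames
lemma pvFrames_core (mn : Int) (det : List Bool) :
    ∀ (i count start : Int) (frames : List Int),
    0 ≤ count →
    (0 < count → start = i - count) →
    frames.Pairwise (· < ·) →
    (∀ x ∈ frames, x < i) →
    (count < max mn 1 → ∀ x ∈ frames, x < i - count) →
    (max mn 1 ≤ count → ∀ f : Int, i - count ≤ f → f < i → f ∈ frames) →
    pvAFrames mn det i frames count start = pvBFrames (max mn 1) det i frames count ∧
    (pvBFrames (max mn 1) det i frames count).Pairwise (· < ·) := by
  have h1le : (1 : Int) ≤ max mn 1 := le_max_right _ _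
  induction det with
  | nil => intro i count start frames _ _ hp _ _ _; exact ⟨rfl, hp⟩
  | cons d rest ih =>
    intro i count start frames hc hs hp hb he hf
    cases d with
    | false =>
      rw [pvAFrames_cons_false, pvBFrames_cons_false]
      exact ih (i + 1) 0 start frames le_rfl (by intro h; omega) hp
        (fun x hx => lt_trans (hb x hx) (by omega))
        (fun _ x hx => by have := hb x hx; omega)
        (fun h => absurd (le_trans h1le h) (by norm_num))
    | true =>
      rw [pvAFrames_cons_true, pvBFrames_cons_true]
      have hstart' : (if count = 0 then i else start) = i - count := by
        by_cases h0 : count = 0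
        · simp [h0]
        · rw [if_neg h0]; exact hs (by omega)
      rw [hstart']
      by_cases hA : mn ≤ count + 1
      · have hMle : max mn 1 ≤ count + 1 := max_le hA (by omega)
        rw [if_pos hA]
        by_cases hth : count + 1 = max mn 1
        · -- run first reaches the threshold: A marks the whole run, B extends with it
          have hlt : count < max mn 1 := by omega
          rw [pvMarkRange_fresh (i + 1) ((i + 1 - (i - count)).toNat) (i - count) frames rfl
                (he hlt), if_pos hth]
          have harg : i - (count + 1) + 1 = i - count := by ring
          rw [harg]
          refine ih (i + 1) (count + 1) (i - count)
            (frames ++ PySem.List.pyRange (i - count) (i + 1) 1)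
            (by omega) (fun _ => by ring) ?_ ?_ (fun h => absurd h (by omega)) ?_
          · refine List.pairwise_append.mpr ⟨hp, ?_, ?_⟩
            · exact PySem.List.pairwise_lt_pyRange_one _ _
            · intro x hx y hy
              have hy' := (PySem.List.mem_pyRange_one).mp hy
              have := he hlt x hx; omega
          · intro x hx
            rcases List.mem_append.mp hx with h | h
            · exact lt_trans (hb x h) (by omega)
            · have := (PySem.List.mem_pyRange_one).mp h; omega
          · intro _ f hf1 hf2
            exact List.mem_append.mpr (Or.inr ((PySem.List.mem_pyRange_one).mpr (by omega)))
        · -- run already past the threshold: A's re-scan appends only frame i, as B does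
          have hge : max mn 1 ≤ count := by omega
          have hcov : pvMarkRange frames (i - count) (i + 1) = frames ++ [i] := by
            have := pvMarkRange_covered ((i + 1 - (i - count)).toNat) (i - count) (i + 1) frames rfl
              (by omega)
              (fun f hf1 hf2 => hf hge f (by omega) (by omega))
              (by intro h
                  have hi' : (i : Int) ∈ frames := by simpa using h
                  exact absurd (hb i hi') (lt_irrefl i))
            simpa using this
          rw [hcov, if_neg hth, if_pos (by omega)]
          refine ih (i + 1) (count + 1) (i - count) (frames ++ [i])
            (by omega) (fun _ => by ring) ?_ ?_ (fun h => absurd h (by omega)) ?_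
          · refine List.pairwise_append.mpr ⟨hp, by simp, ?_⟩
            intro x hx y hy; simp at hy; subst hy; exact hb x hx
          · intro x hx
            rcases List.mem_append.mp hx with h | h
            · exact lt_trans (hb x h) (by omega)
            · simp at h; omega
          · intro _ f hf1 hf2
            by_cases hfi : f = i
            · exact List.mem_append.mpr (Or.inr (by simp [hfi]))
            · exact List.mem_append.mpr (Or.inl (hf hge f (by omega) (by omega)))
      · -- run still below the threshold: neither side records anything
        have hlt : count + 1 < max mn 1 := lt_of_lt_of_le (by omega) (le_max_left mn 1)
        rw [if_neg hA, if_neg (by omega), if_neg (by omega)]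
        refine ih (i + 1) (count + 1) (i - count) frames
          (by omega) (fun _ => by ring) hp
          (fun x hx => lt_trans (hb x hx) (by omega)) ?_ (fun h => absurd h (by omega))
        intro _ x hx
        have := he (by omega) x hx; omega

-- per pose: sorting A's frame list yields exactly B's frame list
lemma pvPose_eq (mn : Int) (det : List Bool) :
    PySem.List.sorted (pvAFrames mn det 0 [] 0 0) (fun x => x) false
      = pvBFrames (max mn 1) det 0 [] 0 := by
  obtain ⟨heq, hpair⟩ := pvFrames_core mn det 0 0 0 []
    le_rfl (by intro h; omega) List.Pairwise.nil (by simp) (by intro _ x hx; simp at hx)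
    (fun h => absurd (le_trans (le_max_right mn 1) h) (by norm_num))
  rw [heq]
  exact PySem.List.sorted_eq_self_of_pairwise _ _ (hpair.imp le_of_lt)

-- ===== VERDICT (by name: the statement is the Claim_ definition above) =====
theorem temporal_pose_filter_spec : Claim_equal_temporal_pose_filter := by
  intro pds mn _
  unfold Spec_temporal_pose_filter temporal_pose_filter temporal_pose_filter_alt
  have hfun : (fun (res : PySem.Dict String (List Int)) (p : String × List Bool) =>
        res.insert p.1 (PySem.List.sorted (pvAFrames mn p.2 0 [] 0 0) (fun x => x) false))
      = (fun (res : PySem.Dict String (List Int)) (p : String × List Bool) =>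
        res.insert p.1 (pvBFrames (max mn 1) p.2 0 [] 0)) := by
    funext res p; rw [pvPose_eq]
  rw [hfun]
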